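-- pv_equiv track=rewrite | github.com/DCP-arca/NAI-Tag-Viewer | prompt_converter.py | split_tokens
-- ===== SOURCE A (Python) =====
-- def split_tokens(text):
--     """
--     Split original string by commas,
--     return tokens and their start/end positions
--     """
--     tokens = []
--     start = 0
--     for i, ch in enumerate(text):
--         if ch == ',':
--             token = text[start:i]
--             if token.strip():
--                 tokens.append((token, start, i-1))
--             start = i + 1
--     if start < len(text):
--         token = text[start:]
--         if token.strip():
--             tokens.append((token, start, len(text)-1))
--     return tokens
-- ===== SOURCE B (Python) =====
-- def split_tokens(text):
--     """
--     Split original string by commas,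
--     return tokens and their start/end positions
--     """
--     tokens = []
--     offset = 0
--     for part in text.split(','):
--         if part.strip():
--             tokens.append((part, offset, offset + len(part) - 1))
--         offset += len(part) + 1
--     return tokens
-- ===== Notes on version B (the rewrite author's own statement) =====
-- stated objective: faster
-- what changed: Replaces A's per-character scan with explicit slice bookkeeping by one comma-split of the text followed by a single pass over the parts that reconstructs each part's start/end from a running offset.
import Mathlib
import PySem

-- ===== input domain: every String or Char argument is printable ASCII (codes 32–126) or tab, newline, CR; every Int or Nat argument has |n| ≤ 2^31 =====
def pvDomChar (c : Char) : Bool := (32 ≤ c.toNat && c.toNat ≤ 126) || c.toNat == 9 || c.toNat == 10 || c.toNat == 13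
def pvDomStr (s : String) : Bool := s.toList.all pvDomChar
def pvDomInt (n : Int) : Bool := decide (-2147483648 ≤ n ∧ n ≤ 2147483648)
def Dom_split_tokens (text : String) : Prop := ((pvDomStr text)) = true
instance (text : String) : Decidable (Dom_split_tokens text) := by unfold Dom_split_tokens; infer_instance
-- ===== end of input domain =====

-- B replaces A's per-character scan (index bookkeeping + slicing) by one comma-split followed by a
-- single pass over the parts with a running offset; objective: faster (measured constant-factor).

-- ===== PORT A =====
-- loop body of A's 'for i, ch in enumerate(text)' (state = (tokens, start))
def stepA (cs : List Char) (st : List (String × Int × Int) × Int) (p : Int × Char) :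
    List (String × Int × Int) × Int :=
  if p.2 = ',' then
    let token := PySem.List.slice cs (some st.2) (some p.1)
    if PySem.Chars.strip token ≠ [] then
      (st.1 ++ [(String.ofList token, st.2, p.1 - 1)], p.1 + 1)
    else (st.1, p.1 + 1)
  else st

-- A's trailing 'if start < len(text): …' after the loop
def finishA (cs : List Char) (st : List (String × Int × Int) × Int) :
    List (String × Int × Int) :=
  if st.2 < (cs.length : Int) then
    let token := PySem.List.slice cs (some st.2) none
    if PySem.Chars.strip token ≠ [] then
      st.1 ++ [(String.ofList token, st.2, (cs.length : Int) - 1)]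
    else st.1
  else st.1

def split_tokens (text : String) : List (String × Int × Int) :=
  let cs := text.toList
  finishA cs ((PySem.List.enumerate cs 0).foldl (stepA cs) ([], 0))

-- ===== PORT B =====
-- loop body of B's 'for part in text.split(',')' (state = (tokens, offset))
def stepB (st : List (String × Int × Int) × Int) (part : List Char) :
    List (String × Int × Int) × Int :=
  ((if PySem.Chars.strip part ≠ [] then
      st.1 ++ [(String.ofList part, st.2, st.2 + (part.length : Int) - 1)]
    else st.1),
   st.2 + (part.length : Int) + 1)

def split_tokens_alt (text : String) : List (String × Int × Int) :=
  ((PySem.Chars.splitOn text.toList [',']).foldl stepB ([], 0)).1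

-- ===== PRECONDITION & SPEC =====
def Spec_split_tokens (text : String) (out : List (String × Int × Int)) : Prop := out = split_tokens_alt text
instance (text : String) (out : List (String × Int × Int)) : Decidable (Spec_split_tokens text out) := by unfold Spec_split_tokens; infer_instance

-- ===== CLAIM (what is proved, stated in full; the proofs are below) =====
def Claim_equal_split_tokens : Prop := ∀ (text : String), Dom_split_tokens text → Spec_split_tokens text (split_tokens text)

-- ===== LEMMAS AND PROOFS =====

-- reference one-pass splitter on ',' carrying the partial segment 'pre'
def splitC (pre : List Char) : List Char → List (List Char)
  | [] => [pre]
  | c :: rest => if c = ',' then pre :: splitC [] rest else splitC (pre ++ [c]) rest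

-- reference token builder: what both programs emit for a part list starting at 'off'
def foldTokens (off : Int) : List (List Char) → List (String × Int × Int)
  | [] => []
  | p :: ps =>
      (if PySem.Chars.strip p ≠ [] then [(String.ofList p, off, off + (p.length : Int) - 1)] else [])
        ++ foldTokens (off + (p.length : Int) + 1) ps

lemma splitOn_go_eq (l : List Char) : ∀ (fuel : Nat) (cur : List Char)
    (acc : List (List Char)), l.length < fuel →
    PySem.Chars.splitOn.go [','] fuel l cur acc = acc.reverse ++ splitC cur.reverse l := by
  induction l with
  | nil =>
    rintro (_ | fuel) cur acc h
    · omega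
    · simp [PySem.Chars.splitOn.go, splitC]
  | cons c rest ih =>
    rintro (_ | fuel) cur acc h
    · omega
    · simp only [List.length_cons] at h
      by_cases hc : c = ','
      · subst hc
        have hstep : PySem.Chars.splitOn.go [','] (fuel+1) (',' :: rest) cur acc
              = PySem.Chars.splitOn.go [','] fuel rest [] (cur.reverse :: acc) := by
          simp [PySem.Chars.splitOn.go, List.isPrefixOf]
        rw [hstep, ih fuel [] (cur.reverse :: acc) (by omega)]
        simp [splitC]
      · have hstep : PySem.Chars.splitOn.go [','] (fuel+1) (c :: rest) cur acc
              = PySem.Chars.splitOn.go [','] fuel rest (c :: cur) acc := by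
          have : ([','].isPrefixOf (c :: rest)) = false := by
            simp [List.isPrefixOf]
            exact fun h' => absurd h'.symm hc
          simp [PySem.Chars.splitOn.go, this]
        rw [hstep, ih fuel (c :: cur) acc (by omega)]
        simp [splitC, hc]

lemma splitOn_eq (s : List Char) : PySem.Chars.splitOn s [','] = splitC [] s := by
  rw [PySem.Chars.splitOn, splitOn_go_eq s (s.length + 1) [] [] (by omega)]
  simp

lemma foldB (parts : List (List Char)) : ∀ (toks : List (String × Int × Int)) (off : Int),
    (parts.foldl stepB (toks, off)).1 = toks ++ foldTokens off parts := by
  induction parts with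
  | nil => intro toks off; simp [foldTokens]
  | cons p ps ih =>
    intro toks off
    rw [List.foldl_cons]
    have h' := ih (stepB (toks, off) p).1 (stepB (toks, off) p).2
    rw [Prod.mk.eta] at h'
    rw [h', show foldTokens off (p :: ps)
          = (if PySem.Chars.strip p ≠ [] then
              [(String.ofList p, off, off + (p.length : Int) - 1)] else [])
            ++ foldTokens (off + (p.length : Int) + 1) ps from rfl]
    by_cases h : PySem.Chars.strip p = [] <;> simp [stepB, h]

lemma foldA (g : List Char) (n : Nat) : ∀ (s0 s : Nat) (toks : List (String × Int × Int)),
    s0 ≤ s → s ≤ g.length → (g.drop s).length = n →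
    ',' ∉ (g.drop s0).take (s - s0) →
    finishA g ((PySem.List.enumerate (g.drop s) (s : Int)).foldl (stepA g) (toks, (s0 : Int)))
      = toks ++ foldTokens (s0 : Int) (splitC ((g.drop s0).take (s - s0)) (g.drop s)) := by
  induction n with
  | zero =>
    intro s0 s toks h0 hs hn hpre
    have hdrop : g.drop s = [] := List.eq_nil_of_length_eq_zero hn
    have hsl : s = g.length := by
      have := List.length_drop (l := g) (i := s); omega
    rw [hdrop]
    simp only [PySem.List.enumerate, List.foldl_nil]
    -- pre = g.drop s0
    have hpre_eq : (g.drop s0).take (s - s0) = g.drop s0 := by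
      apply List.take_of_length_le
      simp [List.length_drop]; omega
    rw [hpre_eq] at hpre ⊢
    simp only [splitC, foldTokens, List.append_nil]
    unfold finishA
    by_cases hlt : (s0 : Int) < (g.length : Int)
    · simp only [hlt, if_pos]
      rw [PySem.List.slice_from_natCast]
      have hlen : ((g.drop s0).length : Int) = (g.length : Int) - s0 := by
        simp only [List.length_drop]; omega
      by_cases hstrip : PySem.Chars.strip (g.drop s0) = []
      · simp [hstrip]
      · simp only [ne_eq, hstrip, not_false_iff, if_pos]
        have : (g.length : Int) - 1 = (s0:Int) + ((g.drop s0).length : Int) - 1 := by omega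
        rw [this]
    · have hs0 : s0 = g.length := by omega
      have : g.drop s0 = [] := by
        apply List.drop_eq_nil_of_le; omega
      simp [hlt, this, PySem.Chars.strip, PySem.Chars.lstrip, PySem.Chars.rstrip]
  | succ n ih =>
    intro s0 s toks h0 hs hn hpre
    obtain ⟨c, rest, hcs⟩ : ∃ c rest, g.drop s = c :: rest := by
      cases h : g.drop s with
      | nil => rw [h] at hn; simp at hn
      | cons a b => exact ⟨a, b, rfl⟩
    have hslen : s < g.length := by
      have := List.length_drop (l := g) (i := s)
      rw [hcs] at this; simp at this; omega
    have hrest : g.drop (s+1) = rest := by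
      have : g.drop (s+1) = (g.drop s).tail := by
        rw [← List.drop_drop]; rw [hcs]; rfl
      simpa [hcs] using this
    have hrestlen : rest.length = n := by
      rw [hcs] at hn; simpa using hn
    rw [hcs, PySem.List.enumerate_cons, List.foldl_cons]
    by_cases hc : c = ','
    · subst hc
      have hstep : stepA g (toks, (s0:Int)) ((s:Int), ',') =
          ((toks ++ if PySem.Chars.strip ((g.drop s0).take (s - s0)) ≠ [] then
              [(String.ofList ((g.drop s0).take (s - s0)), (s0:Int), (s:Int) - 1)] else []),
           (s:Int) + 1) := by
        unfold stepA
        have hslice : PySem.List.slice g (some (s0:Int)) (some (s:Int)) = (g.drop s0).take (s - s0) := by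
          rw [PySem.List.slice_natCast]
        simp only [hslice]
        by_cases hstrip : PySem.Chars.strip ((g.drop s0).take (s - s0)) = [] <;>
          simp [hstrip]
      rw [hstep]
      have hpl : (((g.drop s0).take (s - s0)).length : Int) = (s:Int) - (s0:Int) := by
        have : ((g.drop s0).take (s - s0)).length = s - s0 := by
          simp [List.length_take, List.length_drop]; omega
        rw [this]; omega
      have := ih (s+1) (s+1)
        (toks ++ if PySem.Chars.strip ((g.drop s0).take (s - s0)) ≠ [] then
            [(String.ofList ((g.drop s0).take (s - s0)), (s0:Int), (s:Int) - 1)] else [])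
        (le_refl _) (by omega) (by rw [hrest]; exact hrestlen) (by simp)
      rw [hrest] at this
      push_cast at this
      rw [this]
      rw [show splitC ((g.drop s0).take (s - s0)) (',' :: rest)
            = ((g.drop s0).take (s - s0)) :: splitC [] rest from by simp [splitC]]
      rw [show foldTokens (s0:Int) (((g.drop s0).take (s - s0)) :: splitC [] rest)
            = (if PySem.Chars.strip ((g.drop s0).take (s - s0)) ≠ [] then
                [(String.ofList ((g.drop s0).take (s - s0)), (s0:Int), (s0:Int) + (((g.drop s0).take (s - s0)).length : Int) - 1)] else [])
              ++ foldTokens ((s0:Int) + (((g.drop s0).take (s - s0)).length : Int) + 1) (splitC [] rest) from rfl]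
      rw [hpl]
      have h1 : (s0:Int) + ((s:Int) - (s0:Int)) - 1 = (s:Int) - 1 := by ring
      have h2 : (s0:Int) + ((s:Int) - (s0:Int)) + 1 = (s:Int) + 1 := by ring
      rw [h1, h2]
      simp [List.append_assoc]
    · have hstep : stepA g (toks, (s0:Int)) ((s:Int), c) = (toks, (s0:Int)) := by
        unfold stepA; simp [hc]
      rw [hstep]
      have htake : (g.drop s0).take (s+1 - s0) = (g.drop s0).take (s - s0) ++ [c] := by
        have hidx : (g.drop s0)[s - s0]? = some c := by
          rw [List.getElem?_drop]
          have : s0 + (s - s0) = s := by omega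
          rw [this]
          have : g[s]? = some c := by
            have := List.getElem?_drop (xs := g) (i := s) (j := 0)
            rw [hcs] at this; simpa using this.symm
          exact this
        rw [show s + 1 - s0 = (s - s0) + 1 from by omega, List.take_add_one, hidx]
        rfl
      have hpre' : ',' ∉ (g.drop s0).take (s + 1 - s0) := by
        rw [htake]; simp [hpre]
        exact fun h' => absurd h'.symm hc
      have := ih s0 (s+1) toks (by omega) (by omega) (by rw [hrest]; exact hrestlen) hpre'
      rw [hrest, htake] at this
      push_cast at this
      rw [this]
      rw [show splitC ((g.drop s0).take (s - s0)) (c :: rest)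
            = splitC ((g.drop s0).take (s - s0) ++ [c]) rest from by simp [splitC, hc]]

-- ===== VERDICT (by name: the statement is the Claim_ definition above) =====
theorem split_tokens_spec : Claim_equal_split_tokens := by
  intro text _
  unfold Spec_split_tokens split_tokens split_tokens_alt
  have hA := foldA text.toList text.toList.length 0 0 [] (le_refl 0) (by simp) (by simp) (by simp)
  simp only [List.drop_zero, Nat.sub_zero, Nat.cast_zero, List.nil_append] at hA
  rw [hA, splitOn_eq, foldB]
  simp
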